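-- pv_equiv track=rewrite | github.com/wherby/code | algorithm/advancedDS/莫队算法/频率计算/最长递增数字排列长度.py | getMaxCount
-- ===== SOURCE A (Python) =====
-- from collections import Counter
--
-- def getMaxCount(ls):
--     c = Counter(ls)
--     ret  = acc= len(ls)
--     idx = 1
--     while idx <=ret:  # 用ret的最小值动态控制循环次数
--         acc -= c[idx]
--         ret = min(ret, acc + idx )
--         idx +=1
--     return ret
-- ===== SOURCE B (Python) =====
-- def getMaxCount(ls):
--     n = len(ls)
--     vals = sorted(x for x in ls if 1 <= x <= n)
--     best = 0
--     cum = 0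
--     for v in vals:
--         cum += 1
--         if cum - v > best:
--             best = cum - v
--     return n - best
-- ===== Notes on version B (the rewrite author's own statement) =====
-- stated objective: alternative
-- what changed: Replaces A's Counter plus self-limiting while loop (acc -= c[idx]; ret = min(ret, acc+idx)) with a sort-then-scan algorithm: filter the values into [1,n], sort them, and a single scan over the sorted list tracks the maximal deficit position+1 - value; correct because the prefix-count deficit is maximised at a value present in the list.
import Mathlib
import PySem

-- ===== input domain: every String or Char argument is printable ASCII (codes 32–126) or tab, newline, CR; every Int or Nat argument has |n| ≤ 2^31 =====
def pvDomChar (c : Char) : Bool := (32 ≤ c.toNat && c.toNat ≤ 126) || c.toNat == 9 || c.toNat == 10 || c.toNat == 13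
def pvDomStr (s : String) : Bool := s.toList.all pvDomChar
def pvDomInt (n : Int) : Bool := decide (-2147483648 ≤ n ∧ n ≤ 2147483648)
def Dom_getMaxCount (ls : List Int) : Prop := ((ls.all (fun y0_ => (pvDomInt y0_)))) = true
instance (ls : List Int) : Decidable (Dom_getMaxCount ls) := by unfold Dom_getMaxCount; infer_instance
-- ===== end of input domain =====

-- B replaces A's Counter + self-limiting while/min loop by sort-then-scan: filter the
-- values into [1,n], sort them, and one scan tracks the maximal deficit (objective: alternative).

-- ===== PORT A =====
-- A's while loop: while idx <= ret: acc -= c[idx]; ret = min(ret, acc + idx); idx += 1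
def pvLoopA (c : PySem.Dict Int Int) (ret acc idx : Int) : Int :=
  if _h : idx ≤ ret then
    pvLoopA c (min ret ((acc - c.getD idx 0) + idx)) (acc - c.getD idx 0) (idx + 1)
  else ret
termination_by (ret + 1 - idx).toNat
decreasing_by
  have h1 : min ret ((acc - c.getD idx 0) + idx) ≤ ret := min_le_left _ _
  omega

def getMaxCount (ls : List Int) : Int :=
  let c := PySem.Dict.counter ls
  pvLoopA c (ls.length : Int) (ls.length : Int) 1

-- ===== PORT B =====
-- one step of B's for-loop over the sorted filtered values: cum += 1; if cum - v > best: best = cum - v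
def pvStepS (p : Int × Int) (v : Int) : Int × Int :=
  (p.1 + 1, if p.1 + 1 - v > p.2 then p.1 + 1 - v else p.2)

def getMaxCount_alt (ls : List Int) : Int :=
  let n : Int := (ls.length : Int)
  let vals := PySem.List.sorted (ls.filter (fun x => decide (1 ≤ x ∧ x ≤ n))) (fun x => x) false
  let st := vals.foldl pvStepS (0, 0)
  n - st.2

-- ===== PRECONDITION & SPEC =====
def Spec_getMaxCount (ls : List Int) (out : Int) : Prop := out = getMaxCount_alt ls
instance (ls : List Int) (out : Int) : Decidable (Spec_getMaxCount ls out) := by unfold Spec_getMaxCount; infer_instance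

-- ===== CLAIM (what is proved, stated in full; the proofs are below) =====
def Claim_equal_getMaxCount : Prop := ∀ (ls : List Int), Dom_getMaxCount ls → Spec_getMaxCount ls (getMaxCount ls)

-- ===== LEMMAS AND PROOFS =====

-- number of elements of ls lying in the integer interval [1, m]
def pvCnt (ls : List Int) (m : Int) : Int :=
  (ls.countP (fun x => decide (1 ≤ x ∧ x ≤ m)) : Int)

lemma pvCnt_le_length (ls : List Int) (m : Int) : pvCnt ls m ≤ (ls.length : Int) := by
  unfold pvCnt
  exact_mod_cast List.countP_le_length (l := ls)

lemma pvCnt_zero (ls : List Int) : pvCnt ls 0 = 0 := by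
  unfold pvCnt
  simp only [Int.natCast_eq_zero]
  refine List.countP_eq_zero.mpr ?_
  intro x _
  simp only [decide_eq_true_eq]
  omega

lemma pvCnt_step (ls : List Int) (idx : Int) (h : 1 ≤ idx) :
    pvCnt ls idx = pvCnt ls (idx - 1) + (ls.count idx : Int) := by
  unfold pvCnt
  induction ls with
  | nil => simp
  | cons a t ih =>
    simp only [List.countP_cons, List.count_cons]
    push_cast
    rcases eq_or_ne a idx with ha | ha
    · subst ha
      have h1 : decide (1 ≤ a ∧ a ≤ a) = true := by
        rw [decide_eq_true_eq]; omega
      have h2 : decide (1 ≤ a ∧ a ≤ a - 1) = false := by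
        rw [decide_eq_false_iff_not]; omega
      have h3 : (a == a) = true := by simp
      simp only [h1, h2, h3, if_true]
      push_cast at ih ⊢
      omega
    · have h3 : (a == idx) = false := by simp [ha]
      have heq : decide (1 ≤ a ∧ a ≤ idx) = decide (1 ≤ a ∧ a ≤ idx - 1) := by
        rcases Decidable.em (1 ≤ a ∧ a ≤ idx - 1) with h1 | h1
        · rw [decide_eq_true (show 1 ≤ a ∧ a ≤ idx from ⟨h1.1, by omega⟩),
            decide_eq_true h1]
        · rw [decide_eq_false (show ¬ (1 ≤ a ∧ a ≤ idx) from
            fun h2 => h1 ⟨h2.1, by omega⟩), decide_eq_false h1]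
      simp only [h3, heq]
      push_cast at ih ⊢
      split_ifs with h4 <;> omega

lemma getD_counter_eq (ls : List Int) (v : Int) :
    (PySem.Dict.counter ls).getD v 0 = (ls.count v : Int) := by
  exact_mod_cast PySem.Dict.getD_counter (xs := ls) (v := v)

-- the deficit values A's range loop would look at, as a list (proof vehicle only)
def pvDefR (ls : List Int) : List Int :=
  (PySem.List.pyRange 1 ((ls.length : Int) + 1) 1).map (fun idx => pvCnt ls idx - idx)

-- the deficit values B's scan looks at: position+1 - value along a list, from cum = c
def pvDefS (c : Int) : List Int → List Int
  | [] => []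
  | v :: t => (c + 1 - v) :: pvDefS (c + 1) t

lemma mem_pvDefS (c : Int) (vs : List Int) (x : Int) :
    x ∈ pvDefS c vs ↔ ∃ i : Nat, i < vs.length ∧ x = c + (i : Int) + 1 - vs.getD i 0 := by
  induction vs generalizing c with
  | nil => simp [pvDefS]
  | cons v t ih =>
    simp only [pvDefS, List.mem_cons, ih, List.length_cons]
    constructor
    · rintro (rfl | ⟨i, hi, rfl⟩)
      · exact ⟨0, by omega, by simp⟩
      · exact ⟨i + 1, by omega, by push_cast; simp; ring⟩
    · rintro ⟨i, hi, rfl⟩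
      cases i with
      | zero => left; simp
      | succ j =>
        right
        exact ⟨j, by omega, by push_cast; simp; ring⟩

-- B's fold computes the running max of pvDefS
lemma foldS_eq (vs : List Int) : ∀ (c b : Int),
    (vs.foldl pvStepS (c, b)).2 = (pvDefS c vs).foldl max b := by
  induction vs with
  | nil => intro c b; simp [pvDefS]
  | cons v t ih =>
    intro c b
    simp only [List.foldl_cons, pvDefS]
    have hstep : pvStepS (c, b) v = (c + 1, max b (c + 1 - v)) := by
      unfold pvStepS
      simp only
      split_ifs with h
      · rw [max_eq_right (by omega)]
      · rw [max_eq_left (by omega)]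
    rw [hstep, ih]

-- A's loop, rewritten: with acc = n - pvCnt(idx-1) and ret = n - b, it computes n - max over the remaining deficits
lemma pvKey (ls : List Int) :
    ∀ (k : Nat) (idx b : Int),
      idx + k = (ls.length : Int) + 1 →
      1 ≤ idx →
      0 ≤ b →
      pvLoopA (PySem.Dict.counter ls) ((ls.length : Int) - b)
        ((ls.length : Int) - pvCnt ls (idx - 1)) idx
      = (ls.length : Int) -
        ((PySem.List.pyRange idx ((ls.length : Int) + 1) 1).map
          (fun j => pvCnt ls j - j)).foldl max b := by
  intro k
  induction k with
  | zero =>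
    intro idx b hk h1 hb
    rw [PySem.List.pyRange_one_eq_nil (by omega)]
    rw [pvLoopA, dif_neg (by omega)]
    simp
  | succ k ih =>
    intro idx b hk h1 hb
    have hrun : pvCnt ls (idx - 1) + (PySem.Dict.counter ls).getD idx 0 = pvCnt ls idx := by
      rw [getD_counter_eq, pvCnt_step ls idx h1]
    have hle : pvCnt ls idx ≤ (ls.length : Int) := pvCnt_le_length ls idx
    rw [PySem.List.pyRange_one_cons (by omega)]
    simp only [List.map_cons, List.foldl_cons]
    by_cases hc : idx ≤ (ls.length : Int) - b
    · -- loop continues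
      rw [pvLoopA, dif_pos hc]
      have hacc : (ls.length : Int) - pvCnt ls (idx - 1) - (PySem.Dict.counter ls).getD idx 0
          = (ls.length : Int) - pvCnt ls idx := by omega
      have hret : min ((ls.length : Int) - b)
          (((ls.length : Int) - pvCnt ls (idx - 1) - (PySem.Dict.counter ls).getD idx 0) + idx)
          = (ls.length : Int) - max b (pvCnt ls idx - idx) := by
        rw [hacc]; omega
      rw [hret, hacc]
      have hacc2 : (ls.length : Int) - pvCnt ls idx
          = (ls.length : Int) - pvCnt ls ((idx + 1) - 1) := by norm_num
      rw [hacc2]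
      exact ih (idx + 1) (max b (pvCnt ls idx - idx)) (by omega) (by omega) (by omega)
    · -- cutoff: A stops; the remaining deficits never exceed b
      rw [pvLoopA, dif_neg hc]
      have hrest : ∀ y ∈ ((PySem.List.pyRange (idx + 1) ((ls.length : Int) + 1) 1).map
          (fun j => pvCnt ls j - j)), y ≤ b := by
        intro y hy
        rcases List.mem_map.mp hy with ⟨j, hj, rfl⟩
        rcases (PySem.List.mem_pyRange_one).mp hj with ⟨hj1, hj2⟩
        have := pvCnt_le_length ls j
        omega
      have hmax1 : max b (pvCnt ls idx - idx) = b := by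
        have := pvCnt_le_length ls idx
        omega
      rw [hmax1]
      have : ((PySem.List.pyRange (idx + 1) ((ls.length : Int) + 1) 1).map
          (fun j => pvCnt ls j - j)).foldl max b = b := by
        rcases PySem.List.foldl_max_mem ((PySem.List.pyRange (idx + 1) ((ls.length : Int) + 1) 1).map
            (fun j => pvCnt ls j - j)) b with h0 | hmem
        · exact h0
        · exact le_antisymm (hrest _ hmem) (PySem.List.le_foldl_max _ _).1
      rw [this]

-- abbreviations for the two deficit-value lists of a fixed input
-- (vals = B's sorted filtered list)
def pvVals (ls : List Int) : List Int :=
  PySem.List.sorted (ls.filter (fun x => decide (1 ≤ x ∧ x ≤ (ls.length : Int)))) (fun x => x) false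

lemma pvVals_perm (ls : List Int) :
    (pvVals ls).Perm (ls.filter (fun x => decide (1 ≤ x ∧ x ≤ (ls.length : Int)))) :=
  PySem.List.sorted_perm _ _ _

lemma pvVals_mem_bounds (ls : List Int) (v : Int) (hv : v ∈ pvVals ls) :
    1 ≤ v ∧ v ≤ (ls.length : Int) := by
  have := (pvVals_perm ls).mem_iff.mp hv
  have := List.of_mem_filter this
  simpa using this

-- pvCnt at a bound v ≤ n equals the count of elements ≤ v in vals
lemma pvCnt_eq_countP_vals (ls : List Int) (v : Int) (hv : v ≤ (ls.length : Int)) :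
    pvCnt ls v = ((pvVals ls).countP (fun x => decide (1 ≤ x ∧ x ≤ v)) : Int) := by
  unfold pvCnt
  congr 1
  rw [(pvVals_perm ls).countP_eq]
  rw [List.countP_filter]
  congr 1
  funext a
  rcases Decidable.em (1 ≤ a ∧ a ≤ v) with h | h
  · simp [h, show 1 ≤ a ∧ a ≤ (ls.length : Int) from ⟨h.1, le_trans h.2 hv⟩]
  · simp [h]

lemma pvVals_sorted_mono (ls : List Int) (p q : Nat) (hpq : p ≤ q) (hq : q < (pvVals ls).length) :
    (pvVals ls).getD p 0 ≤ (pvVals ls).getD q 0 := by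
  rw [List.getD_eq_getElem _ _ (lt_of_le_of_lt hpq hq), List.getD_eq_getElem _ _ hq]
  exact PySem.List.sorted_id_getElem_mono _ hpq hq

-- sorted-scan best ≤ range best: a deficit at position i of vals is witnessed at value vals[i]
lemma bestS_le_bestR (ls : List Int) :
    (pvDefS 0 (pvVals ls)).foldl max 0 ≤ (pvDefR ls).foldl max 0 := by
  rcases PySem.List.foldl_max_mem (pvDefS 0 (pvVals ls)) 0 with h0 | hmem
  · rw [h0]; exact (PySem.List.le_foldl_max _ _).1
  · rcases (mem_pvDefS _ _ _).mp hmem with ⟨i, hi, heq⟩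
    set v := (pvVals ls).getD i 0 with hv
    by_cases hpos : (0:Int) + (i : Int) + 1 - v ≤ 0
    · calc (pvDefS 0 (pvVals ls)).foldl max 0 = 0 + (i:Int) + 1 - v := heq
        _ ≤ 0 := hpos
        _ ≤ (pvDefR ls).foldl max 0 := (PySem.List.le_foldl_max _ _).1
    · have hvmem : v ∈ pvVals ls := by
        rw [hv, List.getD_eq_getElem _ _ hi]; exact List.getElem_mem hi
      obtain ⟨hv1, hvn⟩ := pvVals_mem_bounds ls v hvmem
      -- pvCnt ls v ≥ i + 1 : the first i+1 sorted elements all lie in [1, v]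
      have hcnt : (i : Int) + 1 ≤ pvCnt ls v := by
        rw [pvCnt_eq_countP_vals ls v hvn]
        have htake : ((pvVals ls).take (i + 1)).countP (fun x => decide (1 ≤ x ∧ x ≤ v))
            = ((pvVals ls).take (i + 1)).length := by
          rw [List.countP_eq_length]
          intro a ha
          have hmem' : a ∈ pvVals ls := List.mem_of_mem_take ha
          have h1 := (pvVals_mem_bounds ls a hmem').1
          rcases List.mem_take_iff_getElem.mp ha with ⟨j, hj, rfl⟩
          have hjlen : j < (pvVals ls).length := by omega
          have hji : j ≤ i := by omega
          have hmono := pvVals_sorted_mono ls j i hji hi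
          rw [List.getD_eq_getElem _ _ hjlen, ← hv] at hmono
          exact decide_eq_true ⟨h1, hmono⟩
        have hlen : ((pvVals ls).take (i + 1)).length = i + 1 := by
          rw [List.length_take]; omega
        have hsplit : (pvVals ls).countP (fun x => decide (1 ≤ x ∧ x ≤ v))
            ≥ ((pvVals ls).take (i + 1)).countP (fun x => decide (1 ≤ x ∧ x ≤ v)) := by
          conv_lhs => rw [← List.take_append_drop (i + 1) (pvVals ls)]
          rw [List.countP_append]
          omega
        omega
      -- the deficit at value v in pvDefR dominates
      have hvR : pvCnt ls v - v ∈ pvDefR ls := by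
        unfold pvDefR
        exact List.mem_map.mpr ⟨v, PySem.List.mem_pyRange_one.mpr ⟨hv1, by omega⟩, rfl⟩
      calc (pvDefS 0 (pvVals ls)).foldl max 0 = 0 + (i:Int) + 1 - v := heq
        _ ≤ pvCnt ls v - v := by omega
        _ ≤ (pvDefR ls).foldl max 0 := (PySem.List.le_foldl_max _ _).2 _ hvR

-- range best ≤ sorted-scan best: a positive deficit at idx is witnessed at position pvCnt(idx)-1
lemma bestR_le_bestS (ls : List Int) :
    (pvDefR ls).foldl max 0 ≤ (pvDefS 0 (pvVals ls)).foldl max 0 := by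
  rcases PySem.List.foldl_max_mem (pvDefR ls) 0 with h0 | hmem
  · rw [h0]; exact (PySem.List.le_foldl_max _ _).1
  · rcases List.mem_map.mp hmem with ⟨idx, hidx, heq⟩
    rcases PySem.List.mem_pyRange_one.mp hidx with ⟨h1, h2⟩
    by_cases hpos : pvCnt ls idx - idx ≤ 0
    · calc (pvDefR ls).foldl max 0 = pvCnt ls idx - idx := heq.symm
        _ ≤ 0 := hpos
        _ ≤ (pvDefS 0 (pvVals ls)).foldl max 0 := (PySem.List.le_foldl_max _ _).1
    · -- m := countP (1≤x≤idx) vals ≥ 1; vals[m-1] ≤ idx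
      set mN := (pvVals ls).countP (fun x => decide (1 ≤ x ∧ x ≤ idx)) with hmN
      have hcnt : pvCnt ls idx = (mN : Int) := pvCnt_eq_countP_vals ls idx (by omega)
      have hm1 : 1 ≤ mN := by omega
      have hmlen : mN ≤ (pvVals ls).length := List.countP_le_length
      have hvle : (pvVals ls).getD (mN - 1) 0 ≤ idx := by
        by_contra hgt
        rw [not_le] at hgt
        -- every element from position mN-1 on exceeds idx, so countP ≤ mN-1 < mN
        have hdrop : ((pvVals ls).drop (mN - 1)).countP (fun x => decide (1 ≤ x ∧ x ≤ idx)) = 0 := by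
          rw [List.countP_eq_zero]
          intro a ha
          rcases List.mem_iff_getElem.mp ha with ⟨j, hj, rfl⟩
          rw [List.getElem_drop]
          have hjlt : mN - 1 + j < (pvVals ls).length := by
            rw [List.length_drop] at hj; omega
          have hmono := pvVals_sorted_mono ls (mN - 1) (mN - 1 + j) (by omega) hjlt
          rw [List.getD_eq_getElem _ _ hjlt] at hmono
          simp only [decide_eq_true_eq]
          intro hcon
          have := hcon.2
          omega
        have := List.take_append_drop (mN - 1) (pvVals ls)
        have hsum : mN = ((pvVals ls).take (mN - 1)).countP (fun x => decide (1 ≤ x ∧ x ≤ idx))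
            + ((pvVals ls).drop (mN - 1)).countP (fun x => decide (1 ≤ x ∧ x ≤ idx)) := by
          rw [hmN]
          conv_lhs => rw [← List.take_append_drop (mN - 1) (pvVals ls)]
          rw [List.countP_append]
        have htk : ((pvVals ls).take (mN - 1)).countP (fun x => decide (1 ≤ x ∧ x ≤ idx))
            ≤ mN - 1 := le_trans List.countP_le_length (by rw [List.length_take]; omega)
        omega
      have hS : (0:Int) + ((mN - 1 : Nat) : Int) + 1 - (pvVals ls).getD (mN - 1) 0
          ∈ pvDefS 0 (pvVals ls) := by
        rw [mem_pvDefS]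
        exact ⟨mN - 1, by omega, rfl⟩
      calc (pvDefR ls).foldl max 0 = pvCnt ls idx - idx := heq.symm
        _ ≤ (0:Int) + ((mN - 1 : Nat) : Int) + 1 - (pvVals ls).getD (mN - 1) 0 := by
            have : ((mN - 1 : Nat) : Int) = (mN : Int) - 1 := by omega
            omega
        _ ≤ (pvDefS 0 (pvVals ls)).foldl max 0 := (PySem.List.le_foldl_max _ _).2 _ hS

-- ===== VERDICT (by name: the statement is the Claim_ definition above) =====
theorem getMaxCount_spec : Claim_equal_getMaxCount := by
  intro ls _
  unfold Spec_getMaxCount getMaxCount getMaxCount_alt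
  simp only
  have hA := pvKey ls ls.length 1 0 (by omega) (by omega) (by omega)
  norm_num at hA
  rw [pvCnt_zero] at hA
  have hA' : pvLoopA (PySem.Dict.counter ls) (ls.length : Int) (ls.length : Int) 1
      = (ls.length : Int) - (pvDefR ls).foldl max 0 := by
    simpa [pvDefR] using hA
  rw [hA', foldS_eq]
  have h1 := bestS_le_bestR ls
  have h2 := bestR_le_bestS ls
  have : (pvDefR ls).foldl max 0 = (pvDefS 0 (pvVals ls)).foldl max 0 := le_antisymm h2 h1
  rw [this]
  rfl
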